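-- pv_equiv track=rewrite | github.com/EyalBiras/physicsLab | errors.py | convert_unit_to_latex
-- ===== SOURCE A (Python) =====
-- class UnKnownOperator(Exception):
--     pass
--
-- def convert_unit_to_latex(unit: str) -> str:
--     known_operators = ["/", "*", "^"]
--     unit = unit.replace(" ", "")
--     latex = ""
--     for i, character in enumerate(unit):
--         if character == "/":
--             return f"\\frac{{{unit[:i]}}}{{{convert_unit_to_latex(unit[i + 1:])}}}"
--         elif character == "*":
--             return f"{unit[:i]}\cdot{convert_unit_to_latex(unit[i + 1:])}"
--         elif character == "^":
--             return f"{unit[:i]} ^ {{{unit[i + 1]}}} {convert_unit_to_latex(unit[i + 2:])}"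
--         elif not character.isalpha():
--             raise UnKnownOperator(
--                 f"You passed unknown operator{character}, please make sure it is one of these {known_operators}")
--     return unit
-- ===== SOURCE B (Python) =====
-- class UnKnownOperator(Exception):
--     pass
--
-- def convert_unit_to_latex(unit: str) -> str:
--     known_operators = ["/", "*", "^"]
--     unit = unit.replace(" ", "")
--     # Stage 1: tokenize into segments (token, op), op in {"/", "*", "^<exp>", ""}.
--     segs = []
--     tok = []
--     i = 0
--     n = len(unit)
--     while i < n:
--         c = unit[i]
--         if c == "/" or c == "*":
--             segs.append(("".join(tok), c))
--             tok = []
--         elif c == "^":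
--             segs.append(("".join(tok), "^" + unit[i + 1]))
--             tok = []
--             i += 1
--         elif c.isalpha():
--             tok.append(c)
--         else:
--             raise UnKnownOperator(
--                 f"You passed unknown operator{c}, please make sure it is one of these {known_operators}")
--         i += 1
--     segs.append(("".join(tok), ""))
--     # Stage 2: render each segment independently, then close all fractions.
--     def render(seg):
--         t, op = seg
--         if op == "/":
--             return "\\frac{" + t + "}{"
--         if op == "*":
--             return t + "\\cdot"
--         if op == "":
--             return t
--         return t + " ^ {" + op[1] + "} "
--     return "".join(map(render, segs)) + "}" * sum(1 for s in segs if s[1] == "/")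
-- ===== Notes on version B (the rewrite author's own statement) =====
-- stated objective: alternative
-- what changed: Replaced A's recursion over the suffix (re-slicing the string at each operator) by a staged pipeline: one tokenizer pass producing a list of (token, operator) segments, then a separate renderer that maps each segment to its LaTeX fragment, joins them, and appends one closing brace per division segment.
import Mathlib
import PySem

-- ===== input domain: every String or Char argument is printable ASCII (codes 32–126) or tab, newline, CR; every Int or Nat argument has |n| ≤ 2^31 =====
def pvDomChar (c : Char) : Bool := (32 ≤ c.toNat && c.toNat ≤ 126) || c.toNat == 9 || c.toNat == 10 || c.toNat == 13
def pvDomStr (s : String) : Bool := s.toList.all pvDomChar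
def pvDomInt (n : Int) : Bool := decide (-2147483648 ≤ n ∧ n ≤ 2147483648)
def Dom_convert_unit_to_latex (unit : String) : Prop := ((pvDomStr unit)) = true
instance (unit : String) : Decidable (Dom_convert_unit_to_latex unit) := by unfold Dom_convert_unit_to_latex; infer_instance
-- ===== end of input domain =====

-- B replaces A's recursion-over-suffix (with repeated slicing) by a staged pipeline:
-- tokenize into (token, operator) segments, then render each segment independently,
-- join, and append one closing brace per '/' segment (objective: alternative).

-- ===== PORT A =====
-- A's enumerate loop over the stripped string: `pre` is the scanned prefix (reversed),
-- `rest` the remaining suffix; each operator branch recurses on the suffix exactly as A does.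
def pvGoA (pre rest : List Char) : List Char :=
  match rest with
  | [] => pre.reverse
  | c :: rs =>
    if c = '/' then "\\frac{".toList ++ pre.reverse ++ "}{".toList ++ pvGoA [] rs ++ ['}']
    else if c = '*' then pre.reverse ++ "\\cdot".toList ++ pvGoA [] rs
    else if c = '^' then
      match rs with
      | [] => []                -- Python: IndexError on unit[i + 1] (excluded by Pre_)
      | e :: rs' => pre.reverse ++ " ^ {".toList ++ [e] ++ "} ".toList ++ pvGoA [] rs'
    else if c.isAlpha then pvGoA (c :: pre) rs
    else []                     -- Python: raise UnKnownOperator (excluded by Pre_)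
termination_by rest.length

def convert_unit_to_latex (unit : String) : String :=
  String.ofList (pvGoA [] (PySem.Str.replace unit " " "").toList)

-- ===== PORT B =====
-- B's segment: the operator following a token ('/' , '*', '^' with its exponent char, or end).
inductive PvOp
  | div
  | mul
  | pow (e : Char)
  | fin
deriving DecidableEq, Repr

-- Stage 1: tokenizer producing the list of (token, operator) segments.
def pvTok (rest tok : List Char) : List (List Char × PvOp) :=
  match rest with
  | [] => [(tok, PvOp.fin)]
  | c :: rs =>
    if c = '/' then (tok, PvOp.div) :: pvTok rs []
    else if c = '*' then (tok, PvOp.mul) :: pvTok rs []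
    else if c = '^' then
      match rs with
      | [] => []                -- Python: IndexError on unit[i + 1] (excluded by Pre_)
      | e :: rs' => (tok, PvOp.pow e) :: pvTok rs' []
    else if c.isAlpha then pvTok rs (tok ++ [c])
    else []                     -- Python: raise UnKnownOperator (excluded by Pre_)
termination_by rest.length

-- Stage 2: each segment rendered on its own.
def pvRenderSeg (s : List Char × PvOp) : List Char :=
  match s.2 with
  | PvOp.div => "\\frac{".toList ++ s.1 ++ "}{".toList
  | PvOp.mul => s.1 ++ "\\cdot".toList
  | PvOp.pow e => s.1 ++ " ^ {".toList ++ [e] ++ "} ".toList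
  | PvOp.fin => s.1

def convert_unit_to_latex_alt (unit : String) : String :=
  let segs := pvTok (PySem.Str.replace unit " " "").toList []
  String.ofList ((segs.map pvRenderSeg).flatten ++
    List.replicate (segs.countP (fun s => decide (s.2 = PvOp.div))) '}')

-- ===== PRECONDITION & SPEC =====
-- parity of the leading run of '^' characters
def pvHatPar (l : List Char) : Nat := (l.takeWhile (fun c => c = '^')).length % 2

-- Closed-form validity of the space-stripped character list: every character that is not a
-- letter and not one of '/', '*', '^' must stand at an exponent position (immediately after
-- an odd run of '^', hence consumed as an exponent), and the list must not end in an odd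
-- trailing run of '^' (a dangling exponent operator).
def pvValidChars (t : List Char) : Prop :=
  (∀ i < t.length, pvHatPar ((t.take i).reverse) = 1 ∨
      (t.getD i ' ').isAlpha = true ∨ t.getD i ' ' = '/' ∨ t.getD i ' ' = '*' ∨ t.getD i ' ' = '^') ∧
  pvHatPar t.reverse = 0

-- Pre_ holds exactly where Python A returns: otherwise A raises UnKnownOperator
-- (a non-alpha non-operator character at a non-exponent position) or IndexError (a trailing '^').
def Pre_convert_unit_to_latex (unit : String) : Prop :=
  pvValidChars (PySem.Str.replace unit " " "").toList
instance (unit : String) : Decidable (Pre_convert_unit_to_latex unit) := by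
  unfold Pre_convert_unit_to_latex pvValidChars; infer_instance

def pvWitness_convert_unit_to_latex : String := "m / s^2 * kg"

def Spec_convert_unit_to_latex (unit : String) (out : String) : Prop := out = convert_unit_to_latex_alt unit
instance (unit : String) (out : String) : Decidable (Spec_convert_unit_to_latex unit out) := by unfold Spec_convert_unit_to_latex; infer_instance

-- ===== CLAIM (what is proved, stated in full; the proofs are below) =====
def Claim_equal_convert_unit_to_latex : Prop := ∀ (unit : String), Dom_convert_unit_to_latex unit → Pre_convert_unit_to_latex unit → Spec_convert_unit_to_latex unit (convert_unit_to_latex unit)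

-- ===== LEMMAS AND PROOFS =====

-- Proof device: grammar check equivalent to pvValidChars, convenient for induction.
def pvUnitOk : List Char → Bool
  | [] => true
  | ['^'] => false
  | '^' :: _ :: rs' => pvUnitOk rs'
  | c :: rs => (c.isAlpha || c = '/' || c = '*') && pvUnitOk rs

theorem pvHatPar_append_two (xs : List Char) (e : Char) :
    pvHatPar (xs ++ [e, '^']) = pvHatPar xs := by
  unfold pvHatPar
  induction xs with
  | nil => by_cases he : e = '^' <;> simp [List.takeWhile, he]
  | cons x xs ih => by_cases hx : x = '^' <;> simp [List.takeWhile, hx] <;> omega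

theorem pvHatPar_append_one (xs : List Char) (c : Char) (hc : ¬ c = '^') :
    pvHatPar (xs ++ [c]) = pvHatPar xs := by
  unfold pvHatPar
  induction xs with
  | nil => simp [List.takeWhile, hc]
  | cons x xs ih => by_cases hx : x = '^' <;> simp [List.takeWhile, hx] <;> omega

-- pvValidChars implies the grammar check.
theorem pvValid_ok (t : List Char) (hv : pvValidChars t) : pvUnitOk t = true := by
  obtain ⟨hall, htr⟩ := hv
  induction t using pvUnitOk.induct with
  | case1 => simp [pvUnitOk]
  | case2 => simp [pvHatPar, List.takeWhile] at htr
  | case3 e rs' ih =>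
    rw [show ('^' :: e :: rs').reverse = rs'.reverse ++ [e, '^'] by simp,
        pvHatPar_append_two] at htr
    have hall' : ∀ i < rs'.length, pvHatPar ((rs'.take i).reverse) = 1 ∨
        (rs'.getD i ' ').isAlpha = true ∨ rs'.getD i ' ' = '/' ∨ rs'.getD i ' ' = '*' ∨ rs'.getD i ' ' = '^' := by
      intro i hi
      have := hall (i + 2) (by simp; omega)
      rwa [show (('^' :: e :: rs').take (i + 2)).reverse = (rs'.take i).reverse ++ [e, '^'] by simp,
          pvHatPar_append_two, List.getD_cons_succ, List.getD_cons_succ] at this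
    simp only [pvUnitOk]
    exact ih hall' htr
  | case4 c rs h1 h2 ih =>
    have hc : ¬ c = '^' := fun he => by
      cases rs with
      | nil => exact h1 he rfl
      | cons a b => exact h2 a b he rfl
    have h0 := hall 0 (by simp)
    rw [List.take_zero, List.reverse_nil, List.getD_cons_zero] at h0
    have hgood : c.isAlpha = true ∨ c = '/' ∨ c = '*' := by
      rcases h0 with h | h | h | h | h
      · simp [pvHatPar, List.takeWhile] at h
      · exact Or.inl h
      · exact Or.inr (Or.inl h)
      · exact Or.inr (Or.inr h)
      · exact absurd h hc
    rw [show (c :: rs).reverse = rs.reverse ++ [c] by simp, pvHatPar_append_one _ _ hc] at htr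
    have hall' : ∀ i < rs.length, pvHatPar ((rs.take i).reverse) = 1 ∨
        (rs.getD i ' ').isAlpha = true ∨ rs.getD i ' ' = '/' ∨ rs.getD i ' ' = '*' ∨ rs.getD i ' ' = '^' := by
      intro i hi
      have := hall (i + 1) (by simp; omega)
      rwa [show ((c :: rs).take (i + 1)).reverse = (rs.take i).reverse ++ [c] by simp,
          pvHatPar_append_one _ _ hc, List.getD_cons_succ] at this
    have hok := ih hall' htr
    rcases hgood with h | h | h <;> simp [pvUnitOk, h, hok]

-- Proof device: B's stage-2 rendering of a segment list, as one function.
def pvRenderAll (segs : List (List Char × PvOp)) : List Char :=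
  (segs.map pvRenderSeg).flatten ++
    List.replicate (segs.countP (fun s => decide (s.2 = PvOp.div))) '}'

-- Rendering B's segments of a valid suffix equals A's recursive result on it.
theorem pvRender_tok_eq_goA (rest : List Char) (hok : pvUnitOk rest = true) (tok : List Char) :
    pvRenderAll (pvTok rest tok) = pvGoA tok.reverse rest := by
  induction rest using pvUnitOk.induct generalizing tok with
  | case1 => simp [pvTok, pvGoA, pvRenderAll, pvRenderSeg]
  | case2 => rw [pvUnitOk.eq_def] at hok; simp at hok
  | case3 e rs' ih =>
    rw [pvUnitOk.eq_def] at hok; simp at hok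
    rw [pvTok.eq_def, pvGoA.eq_def]
    simp [pvRenderAll, pvRenderSeg,] at ih ⊢
    simp [ih hok]
  | case4 c rs h1 h2 ih =>
    have hc : ¬ c = '^' := fun he => by
      cases rs with
      | nil => exact h1 he rfl
      | cons a b => exact h2 a b he rfl
    rw [pvUnitOk.eq_def] at hok; simp at hok
    obtain ⟨hcc, hok'⟩ := hok
    rw [pvTok.eq_def, pvGoA.eq_def]
    by_cases hd : c = '/'
    · subst hd
      simp [pvRenderAll, pvRenderSeg, List.replicate_succ'] at ih ⊢
      rw [← List.append_assoc, ih hok']; rfl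
    · by_cases hm : c = '*'
      · subst hm
        simp [pvRenderAll, pvRenderSeg,] at ih ⊢
        simp [ih hok']
      · have ha : c.isAlpha := by
          rcases hcc with (h | h) | h
          · exact h
          · exact absurd h hd
          · exact absurd h hm
        have := ih hok' (tok ++ [c])
        simp at this
        simp [hd, hm, hc, ha, this]

-- ===== VERDICT (by name: the statement is the Claim_ definition above) =====
theorem convert_unit_to_latex_spec : Claim_equal_convert_unit_to_latex := by
  intro unit _ hpre
  have hok := pvValid_ok _ hpre
  unfold Spec_convert_unit_to_latex convert_unit_to_latex convert_unit_to_latex_alt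
  show String.ofList (pvGoA [] _) = String.ofList (pvRenderAll (pvTok _ []))
  rw [pvRender_tok_eq_goA _ hok]
  simp
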